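-- pv_equiv track=rewrite | github.com/h-lu/bid-evaluation-assistant | app/mineru_parse_service.py | _extract_full_md
-- ===== SOURCE A (Python) =====
-- def _extract_full_md(content: dict[str, str]) -> str | None:
--     """Extract full.md following SSOT §2.3 priority."""
--     # Priority 3: full.md
--     for name, text in content.items():
--         if name == "full.md" or name.endswith("/full.md"):
--             return text
--
--     # Priority 4: *.md
--     for name, text in content.items():
--         if name.endswith(".md"):
--             return text
--
--     return None
-- ===== SOURCE B (Python) =====
-- def _extract_full_md(content: dict[str, str]) -> str | None:
--     """Extract full.md following SSOT §2.3 priority (single pass with fallback)."""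
--     fallback = None
--     for name, text in content.items():
--         if name == "full.md" or name.endswith("/full.md"):
--             return text
--         if fallback is None and name.endswith(".md"):
--             fallback = text
--     return fallback
-- ===== Notes on version B (the rewrite author's own statement) =====
-- stated objective: alternative
-- what changed: Replaces A's two sequential scans (first for full.md, then for any *.md) with a single pass that early-returns on full.md and carries the first generic *.md as a fallback accumulator.
import Mathlib
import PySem

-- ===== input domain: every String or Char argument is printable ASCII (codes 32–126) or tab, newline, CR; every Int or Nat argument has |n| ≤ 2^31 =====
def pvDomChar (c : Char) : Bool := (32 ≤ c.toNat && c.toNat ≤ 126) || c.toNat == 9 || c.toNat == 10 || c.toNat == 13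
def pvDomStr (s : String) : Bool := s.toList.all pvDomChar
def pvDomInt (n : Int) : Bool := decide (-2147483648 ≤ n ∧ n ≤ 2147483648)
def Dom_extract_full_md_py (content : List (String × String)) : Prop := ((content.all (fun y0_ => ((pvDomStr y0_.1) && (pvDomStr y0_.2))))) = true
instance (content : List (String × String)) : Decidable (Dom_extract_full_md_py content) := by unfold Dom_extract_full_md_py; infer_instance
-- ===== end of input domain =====

-- B merges A's two sequential scans into one pass carrying the first generic *.md as a fallback; return value only, no side effects.

-- ===== PORT A =====
-- first loop of A: return text of the first entry named full.md (or */full.md)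
def fullMdLoop : List (String × String) → Option String
  | [] => none
  | (name, text) :: rest =>
    if name = "full.md" ∨ PySem.Str.endswith name "/full.md" then some text
    else fullMdLoop rest

-- second loop of A: return text of the first entry whose name ends with ".md"
def anyMdLoop : List (String × String) → Option String
  | [] => none
  | (name, text) :: rest =>
    if PySem.Str.endswith name ".md" then some text
    else anyMdLoop rest

def extract_full_md_py (content : List (String × String)) : Option String :=
  match fullMdLoop content with
  | some t => some t
  | none => anyMdLoop content

-- ===== PORT B =====
-- single pass carrying the first-seen generic *.md text as fallback
def onePassLoop (fallback : Option String) : List (String × String) → Option String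
  | [] => fallback
  | (name, text) :: rest =>
    if name = "full.md" ∨ PySem.Str.endswith name "/full.md" then some text
    else if fallback = none ∧ PySem.Str.endswith name ".md" then onePassLoop (some text) rest
    else onePassLoop fallback rest

def extract_full_md_py_alt (content : List (String × String)) : Option String :=
  onePassLoop none content

-- ===== PRECONDITION & SPEC =====
def Spec_extract_full_md_py (content : List (String × String)) (out : Option String) : Prop := out = extract_full_md_py_alt content
instance (content : List (String × String)) (out : Option String) : Decidable (Spec_extract_full_md_py content out) := by unfold Spec_extract_full_md_py; infer_instance

-- ===== CLAIM (what is proved, stated in full; the proofs are below) =====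
def Claim_equal_extract_full_md_py : Prop := ∀ (content : List (String × String)), Dom_extract_full_md_py content → Spec_extract_full_md_py content (extract_full_md_py content)

-- ===== LEMMAS AND PROOFS =====
theorem onePassLoop_eq (l : List (String × String)) (fb : Option String) :
    onePassLoop fb l =
      match fullMdLoop l with
      | some t => some t
      | none => match fb with
        | some f => some f
        | none => anyMdLoop l := by
  induction l generalizing fb with
  | nil => cases fb <;> rfl
  | cons p rest ih =>
    obtain ⟨name, text⟩ := p
    by_cases h1 : name = "full.md" ∨ PySem.Str.endswith name "/full.md" = true
    · simp only [onePassLoop, fullMdLoop, if_pos h1]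
    · simp only [onePassLoop, fullMdLoop, anyMdLoop, if_neg h1]
      cases fb with
      | some f =>
        rw [if_neg (by simp), ih]
      | none =>
        by_cases h2 : PySem.Str.endswith name ".md" = true
        · rw [if_pos ⟨rfl, h2⟩, ih, if_pos h2]
        · rw [if_neg (fun h => h2 h.2)]
          rw [if_neg h2]
          exact ih none

-- ===== VERDICT (by name: the statement is the Claim_ definition above) =====
theorem extract_full_md_py_spec : Claim_equal_extract_full_md_py := by
  intro content _
  unfold Spec_extract_full_md_py extract_full_md_py extract_full_md_py_alt
  rw [onePassLoop_eq]
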